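-- pv_equiv track=rewrite | github.com/Ttingyu1123/dance-video-stitcher | py-backend/backend/alignment_methods.py | _generate_fingerprints
-- ===== SOURCE A (Python) =====
-- FP_FAN_VALUE = 5        # pairs per anchor
--
-- FP_MIN_TIME_DELTA = 0   # frames
--
-- FP_MAX_TIME_DELTA = 100  # frames
--
-- FP_FREQ_BITS = 10
--
-- FP_DELTA_BITS = 10
--
-- def _generate_fingerprints(
--     peaks: list[tuple[int, int]]
-- ) -> dict[int, list[int]]:
--     """
--     Generate combinatorial fingerprint hashes from peaks.
--     Returns {hash_value: [time_offset, ...]}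
--     """
--     peaks_sorted = sorted(peaks, key=lambda p: (p[0], p[1]))
--     fingerprints: dict[int, list[int]] = {}
--
--     for i, (t1, f1) in enumerate(peaks_sorted):
--         targets = []
--         for j in range(i + 1, len(peaks_sorted)):
--             t2, f2 = peaks_sorted[j]
--             dt = t2 - t1
--             if dt < FP_MIN_TIME_DELTA:
--                 continue
--             if dt > FP_MAX_TIME_DELTA:
--                 break
--             targets.append((t2, f2))
--             if len(targets) >= FP_FAN_VALUE:
--                 break
--
--         for t2, f2 in targets:
--             dt = t2 - t1
--             # Pack into a single hash: f1 | f2 | dt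
--             f1_clip = f1 & ((1 << FP_FREQ_BITS) - 1)
--             f2_clip = f2 & ((1 << FP_FREQ_BITS) - 1)
--             dt_clip = dt & ((1 << FP_DELTA_BITS) - 1)
--             h = (f1_clip << (FP_FREQ_BITS + FP_DELTA_BITS)) | (f2_clip << FP_DELTA_BITS) | dt_clip
--             fingerprints.setdefault(h, []).append(t1)
--
--     return fingerprints
-- ===== SOURCE B (Python) =====
-- FP_FAN_VALUE = 5        # pairs per anchor
--
-- FP_MIN_TIME_DELTA = 0   # frames
--
-- FP_MAX_TIME_DELTA = 100  # frames
--
-- FP_FREQ_BITS = 10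
--
-- FP_DELTA_BITS = 10
--
--
-- def _generate_fingerprints(
--     peaks: list[tuple[int, int]]
-- ) -> dict[int, list[int]]:
--     """
--     Generate combinatorial fingerprint hashes from peaks.
--
--     Streaming one-pass formulation: walk the sorted peaks once; each peak,
--     on arrival, is pushed to every anchor still pending in a sliding window
--     of the FP_FAN_VALUE most recent peaks (provided its time delta fits),
--     then becomes a pending anchor itself.  Anchors leaving the window are
--     complete; no per-anchor forward rescans and no break/continue logic.
--     """
--     peaks_sorted = sorted(peaks)
--     done = []     # finished (t1, f1, targets) records, in anchor order
--     active = []   # pending (t1, f1, targets) for the <= 5 most recent peaks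
--     for (t2, f2) in peaks_sorted:
--         active = [
--             (t1, f1, tgts + [(t2, f2)]) if t2 - t1 <= FP_MAX_TIME_DELTA
--             else (t1, f1, tgts)
--             for (t1, f1, tgts) in active
--         ]
--         active.append((t2, f2, []))
--         if len(active) > FP_FAN_VALUE:
--             done.append(active.pop(0))
--     done.extend(active)
--
--     fingerprints: dict[int, list[int]] = {}
--     for (t1, f1, tgts) in done:
--         for (t2, f2) in tgts:
--             dt = t2 - t1
--             f1_clip = f1 & ((1 << FP_FREQ_BITS) - 1)
--             f2_clip = f2 & ((1 << FP_FREQ_BITS) - 1)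
--             dt_clip = dt & ((1 << FP_DELTA_BITS) - 1)
--             h = (f1_clip << (FP_FREQ_BITS + FP_DELTA_BITS)) | (f2_clip << FP_DELTA_BITS) | dt_clip
--             fingerprints.setdefault(h, []).append(t1)
--     return fingerprints
-- ===== Notes on version B (the rewrite author's own statement) =====
-- stated objective: alternative
-- what changed: A's per-anchor forward rescan with continue/break is replaced by a streaming single pass: each arriving peak is pushed onto every anchor pending in a sliding window of the 5 most recent peaks (if its time delta fits) and then joins the window itself, anchors being emitted when they leave the window; a second pass packs hashes and groups times.
import Mathlib
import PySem

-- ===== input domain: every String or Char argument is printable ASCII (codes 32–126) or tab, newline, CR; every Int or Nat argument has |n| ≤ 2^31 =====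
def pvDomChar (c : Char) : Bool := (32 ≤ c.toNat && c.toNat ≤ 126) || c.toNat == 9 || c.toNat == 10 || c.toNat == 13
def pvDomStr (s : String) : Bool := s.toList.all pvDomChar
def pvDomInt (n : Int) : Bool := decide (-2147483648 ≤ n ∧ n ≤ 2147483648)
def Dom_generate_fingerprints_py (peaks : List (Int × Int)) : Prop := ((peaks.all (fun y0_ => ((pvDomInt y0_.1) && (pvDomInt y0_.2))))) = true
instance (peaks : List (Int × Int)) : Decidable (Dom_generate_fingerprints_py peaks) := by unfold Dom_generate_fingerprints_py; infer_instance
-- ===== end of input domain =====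

-- B replaces A's per-anchor forward rescan (continue/break) by one streaming pass with a sliding
-- window of the ≤5 most recent peaks as pending anchors, plus a separate hashing/grouping pass;
-- objective: alternative, not faster. Equivalence is about the return value (A mutates nothing).

-- ===== PORT A =====
-- inner loop 'for j in range(i+1, len(peaks_sorted))' ported as structural recursion over the
-- suffix after position i (the same elements in the same order); targets is the accumulator
def fpTargetsA (t1 : Int) (rest : List (Int × Int)) (targets : List (Int × Int)) : List (Int × Int) :=
  match rest with
  | [] => targets
  | (t2, f2) :: rs =>
    let dt := t2 - t1
    if dt < 0 then fpTargetsA t1 rs targets                 -- 'if dt < FP_MIN_TIME_DELTA: continue'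
    else if dt > 100 then targets                           -- 'if dt > FP_MAX_TIME_DELTA: break'
    else
      let targets' := targets ++ [(t2, f2)]
      if (targets'.length : Int) ≥ 5 then targets'          -- 'if len(targets) >= FP_FAN_VALUE: break'
      else fpTargetsA t1 rs targets'

-- outer 'for i, (t1, f1) in enumerate(peaks_sorted)': structural recursion; the tail rs is
-- exactly peaks_sorted[i+1:], all the index i is used for.
-- 'fingerprints.setdefault(h, []).append(t1)' is ported exactly as
-- 'd.modify h [] (fun l => l ++ [t1])' (appends to the existing list, or inserts [t1] at the end).
def fpLoopA (d : PySem.Dict Int (List Int)) (ps : List (Int × Int)) : PySem.Dict Int (List Int) :=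
  match ps with
  | [] => d
  | (t1, f1) :: rs =>
    let targets := fpTargetsA t1 rs []
    let d' := targets.foldl (fun d q =>
        let dt := q.1 - t1
        let f1_clip := PySem.Int.band f1 ((1 <<< 10) - 1)
        let f2_clip := PySem.Int.band q.2 ((1 <<< 10) - 1)
        let dt_clip := PySem.Int.band dt ((1 <<< 10) - 1)
        let h := PySem.Int.bor (PySem.Int.bor (f1_clip <<< (10 + 10)) (f2_clip <<< 10)) dt_clip
        d.modify h [] (fun l => l ++ [t1])) d
    fpLoopA d' rs

def generate_fingerprints_py (peaks : List (Int × Int)) : List (Int × List Int) :=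
  let peaks_sorted := PySem.List.sorted2 peaks (fun p => p.1) (fun p => p.2) false
  (fpLoopA PySem.Dict.empty peaks_sorted).items

-- ===== PORT B =====
-- one iteration of B's streaming loop over the state (done, active); active entries are
-- (t1, f1, targets); the list comprehension is the map, 'active.pop(0)' the match on the head
def fpStepB (st : List (Int × Int × List (Int × Int)) × List (Int × Int × List (Int × Int)))
    (p : Int × Int) :
    List (Int × Int × List (Int × Int)) × List (Int × Int × List (Int × Int)) :=
  let active := st.2.map (fun a =>
    if p.1 - a.1 ≤ 100 then (a.1, a.2.1, a.2.2 ++ [p]) else (a.1, a.2.1, a.2.2))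
  let active := active ++ [(p.1, p.2, [])]
  if active.length > 5 then
    match active with
    | [] => (st.1, [])                                      -- unreachable (active is nonempty)
    | a0 :: rest => (st.1 ++ [a0], rest)
  else (st.1, active)

def generate_fingerprints_py_alt (peaks : List (Int × Int)) : List (Int × List Int) :=
  -- 'sorted(peaks)': Python's default tuple order is the lexicographic order on Int × Int
  let peaks_sorted := PySem.List.sorted peaks (fun p => (toLex p : Lex (Int × Int))) false
  let st := peaks_sorted.foldl fpStepB ([], [])
  let done := st.1 ++ st.2                                  -- 'done.extend(active)'
  (done.foldl (fun d a => a.2.2.foldl (fun d q =>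
      let dt := q.1 - a.1
      let f1_clip := PySem.Int.band a.2.1 ((1 <<< 10) - 1)
      let f2_clip := PySem.Int.band q.2 ((1 <<< 10) - 1)
      let dt_clip := PySem.Int.band dt ((1 <<< 10) - 1)
      let h := PySem.Int.bor (PySem.Int.bor (f1_clip <<< (10 + 10)) (f2_clip <<< 10)) dt_clip
      d.modify h [] (fun l => l ++ [a.1])) d) PySem.Dict.empty).items

-- ===== PRECONDITION & SPEC =====
def Spec_generate_fingerprints_py (peaks : List (Int × Int)) (out : List (Int × List Int)) : Prop := out = generate_fingerprints_py_alt peaks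
instance (peaks : List (Int × Int)) (out : List (Int × List Int)) : Decidable (Spec_generate_fingerprints_py peaks out) := by unfold Spec_generate_fingerprints_py; infer_instance

-- ===== CLAIM (what is proved, stated in full; the proofs are below) =====
def Claim_equal_generate_fingerprints_py : Prop := ∀ (peaks : List (Int × Int)), Dom_generate_fingerprints_py peaks → Spec_generate_fingerprints_py peaks (generate_fingerprints_py peaks)

-- ===== LEMMAS AND PROOFS =====

-- sorted2 with keys (fst, snd) is sorted with the lexicographic key (= Python's default tuple order)
theorem fp_sorted2_eq_lex (xs : List (Int × Int)) :
    PySem.List.sorted2 xs (fun p => p.1) (fun p => p.2) false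
      = PySem.List.sorted xs (fun p => (toLex p : Lex (Int × Int))) false := by
  have hbf : (fun (a b : Int × Int) =>
        decide (a.1 < b.1) || (!decide (b.1 < a.1) && decide (a.2 < b.2)))
      = (fun (a b : Int × Int) => decide ((toLex a : Lex (Int × Int)) < toLex b)) := by
    funext a b
    rcases lt_trichotomy a.1 b.1 with h|h|h <;> simp_all [Prod.Lex.lt_iff] <;> omega
  unfold PySem.List.sorted2 PySem.List.sorted
  simp only [if_neg (by decide : ¬ (false = true))]
  rw [hbf]

-- the sorted list has nondecreasing first components
theorem fp_sorted_fst_pairwise (xs : List (Int × Int)) :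
    (PySem.List.sorted xs (fun p => (toLex p : Lex (Int × Int))) false).Pairwise
      (fun a b => a.1 ≤ b.1) := by
  refine (PySem.List.sorted_pairwise xs (fun p => (toLex p : Lex (Int × Int)))).imp ?_
  intro a b hab
  rcases Prod.Lex.le_iff.mp hab with h | ⟨h, _⟩
  · exact le_of_lt h
  · exact le_of_eq h

-- A's target scan, under sortedness, is filter of a 5-element window
theorem fp_targets_eq (t1 : Int) (rest : List (Int × Int)) :
    ∀ (acc : List (Int × Int)),
      rest.Pairwise (fun a b => a.1 ≤ b.1) → (∀ q ∈ rest, t1 ≤ q.1) → acc.length < 5 →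
      fpTargetsA t1 rest acc
        = acc ++ (rest.take (5 - acc.length)).filter (fun q => decide (q.1 - t1 ≤ 100)) := by
  induction rest with
  | nil => intro acc _ _ _; simp [fpTargetsA]
  | cons q rs ih =>
    intro acc hpw hall hlen
    obtain ⟨t2, f2⟩ := q
    have ht1 : t1 ≤ t2 := hall (t2, f2) (List.mem_cons_self)
    have hpw' : rs.Pairwise (fun a b => a.1 ≤ b.1) := hpw.of_cons
    have hhead : ∀ r ∈ rs, t2 ≤ r.1 := by
      intro r hr; exact List.rel_of_pairwise_cons hpw hr
    have hall' : ∀ r ∈ rs, t1 ≤ r.1 := fun r hr => le_trans ht1 (hhead r hr)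
    simp only [fpTargetsA]
    rw [if_neg (by omega : ¬ (t2 - t1 < 0))]
    by_cases h100 : t2 - t1 > 100
    · rw [if_pos h100]
      have htake : ∀ r ∈ (((t2, f2) :: rs).take (5 - acc.length)),
          ¬ (decide (r.1 - t1 ≤ 100) = true) := by
        intro r hr
        have hr' := List.mem_of_mem_take hr
        rcases List.mem_cons.mp hr' with rfl | hr''
        · simp; omega
        · have := hhead r hr''; simp; omega
      rw [List.filter_eq_nil_iff.mpr htake, List.append_nil]
    · rw [if_neg h100]
      have htake5 : (5 : Nat) - acc.length = (4 - acc.length) + 1 := by omega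
      rw [htake5, List.take_succ_cons, List.filter_cons_of_pos (by simp; omega)]
      by_cases hfull : ((acc ++ [(t2, f2)]).length : Int) ≥ 5
      · rw [if_pos hfull]
        have h4 : acc.length = 4 := by simp at hfull; omega
        have : (4 : Nat) - acc.length = 0 := by omega
        rw [this, List.take_zero, List.filter_nil]
      · rw [if_neg hfull]
        have hlen' : (acc ++ [(t2, f2)]).length < 5 := by simp at hfull ⊢; omega
        rw [ih (acc ++ [(t2, f2)]) hpw' hall' hlen']
        have : (5 : Nat) - (acc ++ [(t2, f2)]).length = 4 - acc.length := by
          simp only [List.length_append, List.length_cons, List.length_nil]; omega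
        rw [this, List.append_assoc, List.singleton_append]

-- the finished per-anchor records B's streaming pass must produce: each anchor with the
-- dt-filtered 5-element window after it
def fpSpec : List (Int × Int) → List (Int × Int × List (Int × Int))
  | [] => []
  | p :: rs => (p.1, p.2, (rs.take 5).filter (fun q => decide (q.1 - p.1 ≤ 100))) :: fpSpec rs

-- what the pending anchors 'active' become once the remaining stream l is consumed: the entry
-- with k entries after it in the window may still receive 5 - k more peaks
def fpExt (l : List (Int × Int)) : List (Int × Int × List (Int × Int)) → List (Int × Int × List (Int × Int))
  | [] => []
  | a :: rest =>
    (a.1, a.2.1, a.2.2 ++ (l.take (5 - rest.length)).filter (fun q => decide (q.1 - a.1 ≤ 100)))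
      :: fpExt l rest

theorem fpExt_nil (act : List (Int × Int × List (Int × Int))) : fpExt [] act = act := by
  induction act with
  | nil => rfl
  | cons a rest ih => simp [fpExt, ih]

theorem fpExt_step (p : Int × Int) (l' : List (Int × Int)) :
    ∀ (act : List (Int × Int × List (Int × Int))), act.length ≤ 5 →
      fpExt l' ((act.map (fun a =>
          if p.1 - a.1 ≤ 100 then (a.1, a.2.1, a.2.2 ++ [p]) else (a.1, a.2.1, a.2.2)))
        ++ [(p.1, p.2, [])])
        = fpExt (p :: l') act
            ++ [(p.1, p.2, (l'.take 5).filter (fun q => decide (q.1 - p.1 ≤ 100)))] := by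
  intro act
  induction act with
  | nil => intro _; simp [fpExt]
  | cons a rest ih =>
    intro hlen
    have hr : rest.length ≤ 4 := by simp at hlen; omega
    simp only [List.map_cons, List.cons_append, fpExt]
    rw [ih (by omega)]
    have hlen2 : (rest.map (fun a : Int × Int × List (Int × Int) =>
        if p.1 - a.1 ≤ 100 then (a.1, a.2.1, a.2.2 ++ [p]) else (a.1, a.2.1, a.2.2))
        ++ [(p.1, p.2, [])]).length = rest.length + 1 := by simp
    have htk : (5 : Nat) - (rest.length + 1) = 4 - rest.length := by omega
    have htk2 : (5 : Nat) - rest.length = (4 - rest.length) + 1 := by omega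
    rw [hlen2, htk, htk2, List.take_succ_cons]
    by_cases hc : p.1 - a.1 ≤ 100
    · rw [if_pos hc, List.filter_cons_of_pos (by simpa using hc)]
      simp [List.append_assoc]
    · rw [if_neg hc, List.filter_cons_of_neg (by simpa using hc)]

-- the streaming loop, started from (done, active) with ≤ 5 pending anchors, ends with the
-- concatenation done ++ (active run to completion) ++ (one finished record per stream element)
theorem fpLoop_final (l : List (Int × Int)) :
    ∀ (done active : List (Int × Int × List (Int × Int))), active.length ≤ 5 →
      (l.foldl fpStepB (done, active)).1 ++ (l.foldl fpStepB (done, active)).2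
        = done ++ fpExt l active ++ fpSpec l := by
  induction l with
  | nil => intro done active _; simp [fpExt_nil, fpSpec]
  | cons p l' ih =>
    intro done active hlen
    rw [List.foldl_cons]
    have hstep : fpStepB (done, active) p =
        (if (active.map (fun a : Int × Int × List (Int × Int) =>
            if p.1 - a.1 ≤ 100 then (a.1, a.2.1, a.2.2 ++ [p]) else (a.1, a.2.1, a.2.2))
          ++ [(p.1, p.2, [])]).length > 5 then
          match (active.map (fun a : Int × Int × List (Int × Int) =>
            if p.1 - a.1 ≤ 100 then (a.1, a.2.1, a.2.2 ++ [p]) else (a.1, a.2.1, a.2.2)))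
            ++ [(p.1, p.2, [])] with
          | [] => (done, ([] : List (Int × Int × List (Int × Int))))
          | a0 :: rest => (done ++ [a0], rest)
        else (done, (active.map (fun a : Int × Int × List (Int × Int) =>
            if p.1 - a.1 ≤ 100 then (a.1, a.2.1, a.2.2 ++ [p]) else (a.1, a.2.1, a.2.2)))
          ++ [(p.1, p.2, [])])) := rfl
    by_cases hfull : active.length = 5
    · -- the window is full: the oldest anchor is finished and moves to done
      obtain ⟨a0, as, rfl⟩ : ∃ a0 as, active = a0 :: as := by
        cases active with
        | nil => simp at hfull
        | cons a0 as => exact ⟨a0, as, rfl⟩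
      have has : as.length = 4 := by simp at hfull; omega
      rw [hstep]
      rw [if_pos (by simp; omega)]
      simp only [List.map_cons, List.cons_append]
      rw [ih (done ++ [if p.1 - a0.1 ≤ 100 then (a0.1, a0.2.1, a0.2.2 ++ [p])
            else (a0.1, a0.2.1, a0.2.2)])
          ((as.map (fun a : Int × Int × List (Int × Int) =>
            if p.1 - a.1 ≤ 100 then (a.1, a.2.1, a.2.2 ++ [p]) else (a.1, a.2.1, a.2.2)))
            ++ [(p.1, p.2, [])]) (by simp; omega)]
      rw [fpExt_step p l' as (by omega)]
      simp only [fpExt, fpSpec, has]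
      have : (5 : Nat) - 4 = 1 := by omega
      rw [this, List.take_succ_cons, List.take_zero]
      by_cases hc : p.1 - a0.1 ≤ 100
      · rw [if_pos hc, List.filter_cons_of_pos (by simpa using hc), List.filter_nil]
        simp [List.append_assoc]
      · rw [if_neg hc, List.filter_cons_of_neg (by simpa using hc), List.filter_nil]
        simp [List.append_assoc]
    · -- the window still has room: the new peak just joins it
      have hlt : active.length ≤ 4 := by omega
      rw [hstep, if_neg (by simp; omega)]
      rw [ih done _ (by simp; omega)]
      rw [fpExt_step p l' active (by omega)]
      simp [fpSpec, List.append_assoc]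

-- A's outer loop over a time-sorted list is the grouping pass over the fpSpec records
theorem fpLoopA_eq_group (ps : List (Int × Int)) :
    ps.Pairwise (fun a b => a.1 ≤ b.1) → ∀ d,
      fpLoopA d ps = (fpSpec ps).foldl (fun d a => a.2.2.foldl (fun d q =>
        let dt := q.1 - a.1
        let f1_clip := PySem.Int.band a.2.1 ((1 <<< 10) - 1)
        let f2_clip := PySem.Int.band q.2 ((1 <<< 10) - 1)
        let dt_clip := PySem.Int.band dt ((1 <<< 10) - 1)
        let h := PySem.Int.bor (PySem.Int.bor (f1_clip <<< (10 + 10)) (f2_clip <<< 10)) dt_clip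
        d.modify h [] (fun l => l ++ [a.1])) d) d := by
  induction ps with
  | nil => intro _ d; rfl
  | cons x rs ih =>
    intro hpw d
    obtain ⟨t1, f1⟩ := x
    have hall : ∀ q ∈ rs, t1 ≤ q.1 := fun q hq => List.rel_of_pairwise_cons hpw hq
    simp only [fpLoopA, fpSpec, List.foldl_cons]
    rw [fp_targets_eq t1 rs [] hpw.of_cons hall (by simp)]
    rw [ih hpw.of_cons]
    rfl

-- ===== VERDICT (by name: the statement is the Claim_ definition above) =====
theorem generate_fingerprints_py_spec : Claim_equal_generate_fingerprints_py := by
  intro peaks _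
  unfold Spec_generate_fingerprints_py
  simp only [generate_fingerprints_py, generate_fingerprints_py_alt, fp_sorted2_eq_lex]
  have hfin := fpLoop_final
    (PySem.List.sorted peaks (fun p => (toLex p : Lex (Int × Int))) false) [] [] (by simp)
  have hnil : fpExt (PySem.List.sorted peaks (fun p => (toLex p : Lex (Int × Int))) false) [] = [] := rfl
  rw [hnil] at hfin
  simp only [List.nil_append] at hfin
  rw [fpLoopA_eq_group _ (fp_sorted_fst_pairwise peaks) PySem.Dict.empty, ← hfin]
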